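-- pv_equiv track=rewrite | github.com/prachikolte09/python_fun | rpn_expressions.py | findMaximumProfit
-- ===== SOURCE A (Python) =====
-- def findMaximumProfit(category, price):
--     total_items = len(category)
--     cat_items = {}
--     profit = 0
--
--     for n in range(total_items):
--         cur_pr = price[n]
--         cur_cat = category[n]
--         if cur_cat in cat_items:
--             cat_items[cur_cat] += 1
--         else:
--             cat_items[cur_cat] = 1
--
--         cu_prof = cur_pr * cat_items[cur_cat]
--         profit += cu_prof
--     return profit
-- ===== SOURCE B (Python) =====
-- def findMaximumProfit(category, price):
--     groups = {}
--     for n in range(len(category)):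
--         groups.setdefault(category[n], []).append(price[n])
--     total = 0
--     for prices in groups.values():
--         for rank, p in enumerate(prices, 1):
--             total += p * rank
--     return total
-- ===== Notes on version B (the rewrite author's own statement) =====
-- stated objective: alternative
-- what changed: B groups prices by category in one pass and then weights each category's price list by its rank (1,2,...), instead of A's single interleaved loop that maintains a running per-category count and accumulates price*count item by item.
import Mathlib
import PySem

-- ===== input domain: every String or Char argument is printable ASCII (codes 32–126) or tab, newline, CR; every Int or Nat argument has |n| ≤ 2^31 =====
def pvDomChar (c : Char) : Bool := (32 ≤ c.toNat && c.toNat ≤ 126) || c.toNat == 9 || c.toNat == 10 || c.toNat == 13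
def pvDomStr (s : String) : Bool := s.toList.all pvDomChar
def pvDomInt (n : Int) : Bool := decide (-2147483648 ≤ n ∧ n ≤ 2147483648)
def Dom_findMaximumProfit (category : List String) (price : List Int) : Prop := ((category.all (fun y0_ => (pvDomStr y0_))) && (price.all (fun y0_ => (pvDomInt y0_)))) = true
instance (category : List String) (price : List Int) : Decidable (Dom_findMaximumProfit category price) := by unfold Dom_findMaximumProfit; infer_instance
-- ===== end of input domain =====

-- B groups the prices by category first and then weights each category's list by rank 1,2,…,
-- instead of A's single interleaved running-count loop; same O(n) cost (objective: alternative).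

-- ===== PORT A =====
def findMaximumProfit (category : List String) (price : List Int) : Int :=
  let total_items := category.length
  ((PySem.List.pyRange 0 (total_items : Int) 1).foldl
    (fun (s : PySem.Dict String Int × Int) n =>
      let cur_pr := PySem.List.pyGetD price n 0
      let cur_cat := PySem.List.pyGetD category n ""
      let cat_items := if s.1.contains cur_cat then s.1.modify cur_cat 0 (· + 1) else s.1.insert cur_cat 1
      (cat_items, s.2 + cur_pr * cat_items.getD cur_cat 0))
    (PySem.Dict.empty, 0)).2

-- ===== PORT B =====
-- groups.setdefault(c, []).append(p) is d[c] = d.get(c, []) + [p]  →  Dict.modify c [] (· ++ [p])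
def findMaximumProfit_alt (category : List String) (price : List Int) : Int :=
  let groups := (PySem.List.pyRange 0 (category.length : Int) 1).foldl
    (fun (d : PySem.Dict String (List Int)) n =>
      d.modify (PySem.List.pyGetD category n "") [] (· ++ [PySem.List.pyGetD price n 0]))
    PySem.Dict.empty
  groups.values.foldl
    (fun total prices =>
      (PySem.List.enumerate prices 1).foldl (fun total rp => total + rp.2 * rp.1) total)
    0

-- ===== PRECONDITION & SPEC =====
-- Pre_ excludes exactly the inputs where price is shorter than category: there price[n] raises IndexError.
def Pre_findMaximumProfit (category : List String) (price : List Int) : Prop :=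
  category.length ≤ price.length
instance (category : List String) (price : List Int) : Decidable (Pre_findMaximumProfit category price) := by unfold Pre_findMaximumProfit; infer_instance
def pvWitness_findMaximumProfit : List String × List Int := (["a", "b", "a"], [2, 3, 5])

def Spec_findMaximumProfit (category : List String) (price : List Int) (out : Int) : Prop := out = findMaximumProfit_alt category price
instance (category : List String) (price : List Int) (out : Int) : Decidable (Spec_findMaximumProfit category price out) := by unfold Spec_findMaximumProfit; infer_instance

-- ===== CLAIM (what is proved, stated in full; the proofs are below) =====
def Claim_equal_findMaximumProfit : Prop := ∀ (category : List String) (price : List Int), Dom_findMaximumProfit category price → Pre_findMaximumProfit category price → Spec_findMaximumProfit category price (findMaximumProfit category price)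

-- ===== LEMMAS AND PROOFS =====

-- an index loop over range(len(cs)) reading cs[n], ps[n] is a fold over the zip (when ps is long enough)
theorem pv_idx_fold {σ : Type} (g : σ → String → Int → σ) :
    ∀ (cs : List String) (ps : List Int), cs.length ≤ ps.length → ∀ (s : σ),
      (List.range cs.length).foldl (fun s n => g s (cs.getD n "") (ps.getD n 0)) s
        = (cs.zip ps).foldl (fun s cp => g s cp.1 cp.2) s := by
  intro cs
  induction cs with
  | nil => intro ps _ s; simp
  | cons c cs ih =>
    intro ps hle s
    cases ps with
    | nil => simp at hle
    | cons p ps =>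
      simp only [List.length_cons, List.range_succ_eq_map, List.foldl_cons, List.foldl_map,
        List.getD_cons_zero, List.getD_cons_succ, List.zip_cons_cons]
      exact ih ps (by simpa using hle) _

-- reference for A: running-count accumulation over the zipped list, count state as a function
def pvRefA : List (String × Int) → (String → Int) → Int
  | [], _ => 0
  | (c, p) :: l, f => p * (f c + 1) + pvRefA l (fun x => if x = c then f c + 1 else f x)

theorem pv_A_fold (l : List (String × Int)) :
    ∀ (d : PySem.Dict String Int) (t : Int),
      (l.foldl
        (fun (s : PySem.Dict String Int × Int) cp =>
          let cat_items := if s.1.contains cp.1 then s.1.modify cp.1 0 (· + 1) else s.1.insert cp.1 1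
          (cat_items, s.2 + cp.2 * cat_items.getD cp.1 0))
        (d, t)).2 = t + pvRefA l (fun c => d.getD c 0) := by
  induction l with
  | nil => intro d t; simp [pvRefA]
  | cons cp l ih =>
    intro d t
    obtain ⟨c, p⟩ := cp
    by_cases hc : d.contains c
    · simp only [List.foldl_cons, hc, if_true, pvRefA]
      rw [ih]
      have h1 : (d.modify c 0 (· + 1)).getD c 0 = d.getD c 0 + 1 := PySem.Dict.getD_modify_self d c 0 _
      have h2 : (fun x => (d.modify c 0 (· + 1)).getD x 0) = (fun x => if x = c then d.getD c 0 + 1 else d.getD x 0) := by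
        funext x; rw [PySem.Dict.getD_modify]
      rw [h1, h2]; ring
    · have hc' : d.contains c = false := by simpa using hc
      simp only [List.foldl_cons, hc', Bool.false_eq_true, if_false, pvRefA]
      rw [ih]
      have h0 : d.getD c 0 = 0 := PySem.Dict.getD_of_not_contains (d := d) (k := c) (d0 := 0) hc'
      have h1 : (d.insert c 1).getD c 0 = 1 := PySem.Dict.getD_insert_self d c 1 0
      have h2 : (fun x => (d.insert c 1).getD x 0) = (fun x => if x = c then d.getD c 0 + 1 else d.getD x 0) := by
        funext x; rw [PySem.Dict.getD_insert]; split <;> simp [h0]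
      rw [h1, h2, h0]; ring
  -- w: rank-weighted sum of a price list starting at rank r

def pvW : List Int → Int → Int
  | [], _ => 0
  | p :: xs, r => p * r + pvW xs (r + 1)

theorem pv_enum_fold (xs : List Int) : ∀ (r t : Int),
    (PySem.List.enumerate xs r).foldl (fun total rp => total + rp.2 * rp.1) t = t + pvW xs r := by
  induction xs with
  | nil => intro r t; simp [PySem.List.enumerate_nil, pvW]
  | cons p xs ih => intro r t; rw [PySem.List.enumerate_cons]; simp only [List.foldl_cons]; rw [ih, pvW]; ring

theorem pvW_append (ys : List Int) : ∀ (p r : Int), pvW (ys ++ [p]) r = pvW ys r + p * (r + ys.length) := by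
  induction ys with
  | nil => intro p r; simp [pvW]
  | cons q ys ih => intro p r; simp only [List.cons_append, pvW, ih, List.length_cons]; push_cast; ring

-- B's value as a sum over the distinct categories
def pvSB (l : List (String × Int)) : Int :=
  ((PySem.Set.ofList (l.map Prod.fst)).map
    (fun c => pvW ((l.filter (fun q => q.1 == c)).map Prod.snd) 1)).sum

-- updating one element's summand in a sum over a Nodup list
theorem pv_sum_update {α : Type} [DecidableEq α] :
    ∀ (S : List α), S.Nodup → ∀ (c₀ : α), c₀ ∈ S → ∀ (g g' : α → Int) (δ : Int),
      (∀ c ∈ S, c ≠ c₀ → g' c = g c) → g' c₀ = g c₀ + δ →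
      (S.map g').sum = (S.map g).sum + δ := by
  intro S
  induction S with
  | nil => intro _ c₀ h; simp at h
  | cons a S ih =>
    intro hnd c₀ hmem g g' δ hne heq
    rcases List.mem_cons.mp hmem with rfl | hmem'
    · have : ∀ c ∈ S, g' c = g c := by
        intro c hc
        exact hne c (List.mem_cons_of_mem _ hc) (fun h => (List.nodup_cons.mp hnd).1 (h ▸ hc))
      simp only [List.map_cons, List.sum_cons, heq, List.map_congr_left this]; ring
    · have ha : g' a = g a := hne a (List.mem_cons_self ..) (fun h => (List.nodup_cons.mp hnd).1 (h ▸ hmem'))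
      simp only [List.map_cons, List.sum_cons, ha,
        ih (List.nodup_cons.mp hnd).2 c₀ hmem' g g' δ (fun c hc => hne c (List.mem_cons_of_mem _ hc)) heq]
      ring

theorem pv_count_filter (l : List (String × Int)) (c : String) :
    ((l.filter (fun q => q.1 == c)).map Prod.snd).length = (l.map Prod.fst).count c := by
  rw [List.length_map]
  induction l with
  | nil => simp
  | cons q l ih =>
    simp only [List.filter_cons, List.map_cons, List.count_cons]
    by_cases h : q.1 = c <;> simp [h, ih]

theorem pvSB_append (l : List (String × Int)) (x : String × Int) :
    pvSB (l ++ [x]) = pvSB l + x.2 * (((l.map Prod.fst).count x.1 : Int) + 1) := by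
  obtain ⟨c₀, p⟩ := x
  unfold pvSB
  simp only [List.map_append, List.map_cons, List.map_nil, PySem.Set.ofList_append_singleton]
  have hfilter : ∀ c : String, ((l ++ [(c₀, p)]).filter (fun q => q.1 == c))
      = l.filter (fun q => q.1 == c) ++ if c₀ = c then [(c₀, p)] else [] := by
    intro c; rw [List.filter_append]; simp only [List.filter_cons, List.filter_nil]
    by_cases h : c₀ = c <;> simp [h]
  by_cases hmem : c₀ ∈ PySem.Set.ofList (l.map Prod.fst)
  · rw [PySem.Set.add_of_mem hmem]
    apply pv_sum_update _ (PySem.Set.nodup_ofList _) c₀ hmem _ _ _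
    · intro c _ hne
      rw [hfilter c, if_neg (fun h => hne h.symm), List.append_nil]
    · rw [hfilter c₀, if_pos rfl, List.map_append, List.map_cons, List.map_nil, pvW_append,
        pv_count_filter]
      ring
  · rw [PySem.Set.add_of_not_mem hmem, List.map_append, List.sum_append, List.map_cons, List.map_nil,
      List.sum_cons, List.sum_nil]
    have hcong : ∀ c ∈ PySem.Set.ofList (l.map Prod.fst),
        pvW (((l ++ [(c₀, p)]).filter (fun q => q.1 == c)).map Prod.snd) 1
          = pvW ((l.filter (fun q => q.1 == c)).map Prod.snd) 1 := by
      intro c hc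
      rw [hfilter c, if_neg (fun h => hmem (by rw [h]; exact hc)), List.append_nil]
    have hnot : c₀ ∉ l.map Prod.fst := fun h => hmem ((PySem.Set.mem_ofList _ _).mpr h)
    have hfe : (l ++ [(c₀, p)]).filter (fun q => q.1 == c₀) = [(c₀, p)] := by
      rw [hfilter c₀, if_pos rfl]
      have : l.filter (fun q => q.1 == c₀) = [] := by
        rw [List.filter_eq_nil_iff]
        intro q hq hcq
        exact hnot (List.mem_map.mpr ⟨q, hq, by simpa using hcq⟩)
      rw [this, List.nil_append]
    rw [List.map_congr_left hcong, hfe]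
    have hcnt : (l.map Prod.fst).count c₀ = 0 := List.count_eq_zero.mpr hnot
    simp [pvW, hcnt]

theorem pvRefA_append (l : List (String × Int)) (x : String × Int) :
    ∀ f : String → Int,
      pvRefA (l ++ [x]) f = pvRefA l f + x.2 * (f x.1 + ((l.map Prod.fst).count x.1 : Int) + 1) := by
  induction l with
  | nil => intro f; obtain ⟨c, p⟩ := x; simp [pvRefA]
  | cons cp l ih =>
    intro f
    obtain ⟨c, p⟩ := cp
    simp only [List.cons_append, pvRefA, ih, List.map_cons, List.count_cons]
    by_cases h : x.1 = c
    · simp [h]; ring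
    · simp [h, Ne.symm h]; ring

theorem pv_main (l : List (String × Int)) : pvRefA l (fun _ => 0) = pvSB l := by
  induction l using List.reverseRecOn with
  | nil => simp [pvRefA, pvSB, PySem.Set.ofList_nil]
  | append_singleton l x ih => rw [pvRefA_append, pvSB_append, ih]; ring

-- B's grouping fold characterised
theorem pv_B_groups (l : List (String × Int)) :
    (l.foldl (fun (d : PySem.Dict String (List Int)) cp => d.modify cp.1 [] (· ++ [cp.2]))
        PySem.Dict.empty).values.foldl
      (fun total prices =>
        (PySem.List.enumerate prices 1).foldl (fun total rp => total + rp.2 * rp.1) total) 0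
    = pvSB l := by
  set G := l.foldl (fun (d : PySem.Dict String (List Int)) cp => d.modify cp.1 [] (· ++ [cp.2]))
      PySem.Dict.empty with hG
  have hnd : G.keys.Nodup := by
    exact PySem.Dict.nodup_keys_foldl_modify_key l Prod.fst [] (fun _ cp ys => ys ++ [cp.2])
      PySem.Dict.empty (by simp [PySem.Dict.keys_empty])
  have hkeys : G.keys = PySem.Set.ofList (l.map Prod.fst) := by
    rw [hG, PySem.Dict.keys_foldl_modify_key]
    simp [PySem.Dict.keys_empty, PySem.Set.update_nil_left]
  have hval : ∀ c, G.getD c [] = (l.filter (fun q => q.1 == c)).map Prod.snd := by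
    intro c
    rw [hG, PySem.Dict.getD_foldl_modify_append]
    simp [PySem.Dict.getD_empty]
  rw [PySem.Dict.values_eq_map_keys G hnd []]
  rw [List.foldl_map]
  have : ∀ (S : List String) (t : Int),
      S.foldl (fun total k =>
        (PySem.List.enumerate (G.getD k []) 1).foldl (fun total rp => total + rp.2 * rp.1) total) t
      = t + (S.map (fun c => pvW (G.getD c []) 1)).sum := by
    intro S
    induction S with
    | nil => intro t; simp
    | cons k S ih => intro t; simp only [List.foldl_cons]; rw [pv_enum_fold, ih, List.map_cons, List.sum_cons]; ring
  rw [this, hkeys]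
  unfold pvSB
  rw [List.map_congr_left (fun c _ => by rw [hval c])]
  ring

-- ===== VERDICT (by name: the statement is the Claim_ definition above) =====
theorem findMaximumProfit_spec : Claim_equal_findMaximumProfit := by
  intro category price _ hpre
  unfold Spec_findMaximumProfit findMaximumProfit findMaximumProfit_alt
  simp only [PySem.List.pyRange_zero_natCast, List.foldl_map, PySem.List.pyGetD_natCast]
  have hA := pv_idx_fold
    (g := fun (s : PySem.Dict String Int × Int) (c : String) (p : Int) =>
      ((if s.1.contains c then s.1.modify c 0 (· + 1) else s.1.insert c 1),
        s.2 + p * (if s.1.contains c then s.1.modify c 0 (· + 1) else s.1.insert c 1).getD c 0))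
    category price hpre (PySem.Dict.empty, 0)
  have hB := pv_idx_fold
    (g := fun (d : PySem.Dict String (List Int)) (c : String) (p : Int) => d.modify c [] (· ++ [p]))
    category price hpre PySem.Dict.empty
  rw [show (fun (x : PySem.Dict String Int × Int) (y : Nat) =>
        ((if x.1.contains (category.getD y "") then x.1.modify (category.getD y "") 0 (· + 1)
            else x.1.insert (category.getD y "") 1),
          x.2 + price.getD y 0 *
            (if x.1.contains (category.getD y "") then x.1.modify (category.getD y "") 0 (· + 1)
              else x.1.insert (category.getD y "") 1).getD (category.getD y "") 0))
      = (fun (s : PySem.Dict String Int × Int) (n : Nat) =>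
          ((if s.1.contains (category.getD n "") then s.1.modify (category.getD n "") 0 (· + 1)
              else s.1.insert (category.getD n "") 1),
            s.2 + price.getD n 0 *
              (if s.1.contains (category.getD n "") then s.1.modify (category.getD n "") 0 (· + 1)
                else s.1.insert (category.getD n "") 1).getD (category.getD n "") 0)) from rfl]
  rw [hA, hB, pv_A_fold, pv_B_groups]
  have h0 : (fun c => PySem.Dict.getD (PySem.Dict.empty : PySem.Dict String Int) c 0) = (fun _ => (0 : Int)) := by
    funext c; exact PySem.Dict.getD_empty ..
  rw [h0, pv_main]
  ring
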